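-- pv_equiv track=rewrite | github.com/trilu/lupito-content | analyze_brand_normalization_gaps.py | analyze_brand_in_product_name
-- ===== SOURCE A (Python) =====
-- from typing import Dict, List, Set, Tuple
--
-- def analyze_brand_in_product_name(product_name: str, benchmark: List[str]) -> List[str]:
--     """Check if product name contains a different brand than assigned"""
--     if not product_name:
--         return []
--
--     product_lower = product_name.lower()
--     found_brands = []
--
--     for bench_brand in benchmark:
--         brand_lower = bench_brand.lower()
--         # Check for brand at start of product name or with word boundaries
--         if (product_lower.startswith(brand_lower + ' ') or
--             f' {brand_lower} ' in product_lower or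
--             product_lower.endswith(f' {brand_lower}')):
--             found_brands.append(bench_brand)
--
--     return found_brands
-- ===== SOURCE B (Python) =====
-- def analyze_brand_in_product_name(product_name, benchmark):
--     padded = ' ' + product_name.lower() + ' '
--     seps = [i for i, c in enumerate(padded) if c == ' ']
--     grams = set(padded[a + 1:b] for a in seps for b in seps if a < b)
--     return [b for b in benchmark if b.lower() in grams]
-- ===== Notes on version B (the rewrite author's own statement) =====
-- stated objective: faster
-- what changed: B precomputes once the set of all space-delimited segments (word n-grams) of the padded, lowered product name, then answers each benchmark brand by a single set lookup, instead of A's three substring scans over the product name per brand.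
-- intended difference: When some benchmark brand equals the whole product name case-insensitively, A returns a list omitting that brand (none of its three patterns 'brand ', ' brand ', ' brand' fits the whole string), while B includes it; a product name that IS the brand evidently contains it, so B's value is the intended one. — e.g. on analyze_brand_in_product_name("acme", ["Acme"]): A returns [], B returns ["Acme"]
import Mathlib
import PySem

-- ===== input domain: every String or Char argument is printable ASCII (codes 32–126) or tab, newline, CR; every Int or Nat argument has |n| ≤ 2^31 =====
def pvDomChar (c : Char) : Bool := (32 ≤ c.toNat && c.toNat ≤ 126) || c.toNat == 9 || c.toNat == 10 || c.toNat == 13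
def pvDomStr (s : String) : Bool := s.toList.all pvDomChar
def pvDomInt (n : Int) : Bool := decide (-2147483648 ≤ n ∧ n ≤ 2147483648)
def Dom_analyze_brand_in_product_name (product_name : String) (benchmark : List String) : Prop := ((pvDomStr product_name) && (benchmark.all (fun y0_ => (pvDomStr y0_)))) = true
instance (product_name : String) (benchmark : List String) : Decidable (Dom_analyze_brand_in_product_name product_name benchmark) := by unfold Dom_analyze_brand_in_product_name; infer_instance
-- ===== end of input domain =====

-- B precomputes the set of space-delimited segments of the padded lowered product name once and
-- answers each brand by a set lookup, instead of A's three substring scans per brand (objective: faster).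

-- ===== PORT A =====
-- the three-pattern test of A's loop body: product_lower.startswith(brand_lower+' ')
-- or ' brand_lower ' in product_lower or product_lower.endswith(' '+brand_lower)
def pvCondA (pl bl : List Char) : Bool :=
  PySem.Chars.startswith pl (bl ++ [' ']) ||
  PySem.Chars.isIn (' ' :: (bl ++ [' '])) pl ||
  PySem.Chars.endswith pl (' ' :: bl)

def analyze_brand_in_product_name (product_name : String) (benchmark : List String) : List String :=
  if product_name.toList = [] then []   -- 'if not product_name: return []'
  else
    let pl := PySem.Chars.lower product_name.toList
    benchmark.foldl (fun acc b =>
      if pvCondA pl (PySem.Chars.lower b.toList) then acc ++ [b] else acc) []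

-- ===== PORT B =====
-- padded = ' ' + product_name.lower() + ' '; seps = indices of spaces in padded;
-- grams = set(padded[a+1:b] for a in seps for b in seps if a < b); filter benchmark by set lookup
def analyze_brand_in_product_name_alt (product_name : String) (benchmark : List String) : List String :=
  let padded : List Char := ' ' :: (PySem.Chars.lower product_name.toList ++ [' '])
  let seps : List Int :=
    ((PySem.List.enumerate padded).filter (fun p => p.2 == ' ')).map (fun p => p.1)
  let grams : PySem.Set (List Char) :=
    PySem.Set.ofList (seps.flatMap (fun a =>
      (seps.filter (fun b => decide (a < b))).map (fun b =>
        PySem.List.slice padded (some (a + 1)) (some b))))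
  benchmark.filter (fun b => grams.contains (PySem.Chars.lower b.toList))

-- ===== PRECONDITION & SPEC =====
-- When some benchmark brand equals the whole product name case-insensitively, A returns a list
-- omitting that brand (none of its three patterns fits the whole string), while B includes it;
-- a product name that IS the brand evidently contains it, so B's value is the intended one.
def D_analyze_brand_in_product_name (product_name : String) (benchmark : List String) : Prop :=
  ∃ b ∈ benchmark, PySem.Str.lower b = PySem.Str.lower product_name

instance (product_name : String) (benchmark : List String) : Decidable (D_analyze_brand_in_product_name product_name benchmark) := by
  unfold D_analyze_brand_in_product_name; infer_instance

def Spec_analyze_brand_in_product_name (product_name : String) (benchmark : List String) (out : List String) : Prop := ¬ D_analyze_brand_in_product_name product_name benchmark → out = analyze_brand_in_product_name_alt product_name benchmark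
instance (product_name : String) (benchmark : List String) (out : List String) : Decidable (Spec_analyze_brand_in_product_name product_name benchmark out) := by unfold Spec_analyze_brand_in_product_name; infer_instance

def pvDiffWitness_analyze_brand_in_product_name : String × List String := ("acme", ["Acme"])
def pvDiffWitnessOut_analyze_brand_in_product_name : (List String) × (List String) := ([], ["Acme"])

-- ===== CLAIM (what is proved, stated in full; the proofs are below) =====
def Claim_unchanged_analyze_brand_in_product_name : Prop := ∀ (product_name : String) (benchmark : List String), Dom_analyze_brand_in_product_name product_name benchmark → Spec_analyze_brand_in_product_name product_name benchmark (analyze_brand_in_product_name product_name benchmark)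
def Claim_changed_analyze_brand_in_product_name : Prop := Dom_analyze_brand_in_product_name (pvDiffWitness_analyze_brand_in_product_name.1) (pvDiffWitness_analyze_brand_in_product_name.2) ∧ D_analyze_brand_in_product_name (pvDiffWitness_analyze_brand_in_product_name.1) (pvDiffWitness_analyze_brand_in_product_name.2) ∧ analyze_brand_in_product_name (pvDiffWitness_analyze_brand_in_product_name.1) (pvDiffWitness_analyze_brand_in_product_name.2) = pvDiffWitnessOut_analyze_brand_in_product_name.1 ∧ analyze_brand_in_product_name_alt (pvDiffWitness_analyze_brand_in_product_name.1) (pvDiffWitness_analyze_brand_in_product_name.2) = pvDiffWitnessOut_analyze_brand_in_product_name.2 ∧ pvDiffWitnessOut_analyze_brand_in_product_name.1 ≠ pvDiffWitnessOut_analyze_brand_in_product_name.2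
def Claim_exact_analyze_brand_in_product_name : Prop := ∀ (product_name : String) (benchmark : List String), Dom_analyze_brand_in_product_name product_name benchmark → D_analyze_brand_in_product_name product_name benchmark → analyze_brand_in_product_name product_name benchmark ≠ analyze_brand_in_product_name_alt product_name benchmark

-- ===== LEMMAS AND PROOFS =====

-- proof-side names for B's intermediate data, abstracted over the lowered product characters
def pvPadded (pl : List Char) : List Char := ' ' :: (pl ++ [' '])

def pvSeps (pl : List Char) : List Int :=
  ((PySem.List.enumerate (pvPadded pl)).filter (fun p => p.2 == ' ')).map (fun p => p.1)

def pvGramsList (pl : List Char) : List (List Char) :=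
  (pvSeps pl).flatMap (fun a =>
    ((pvSeps pl).filter (fun b => decide (a < b))).map (fun b =>
      PySem.List.slice (pvPadded pl) (some (a + 1)) (some b)))

lemma pvAlt_eq_filter (pn : String) (bm : List String) :
    analyze_brand_in_product_name_alt pn bm =
      bm.filter (fun b =>
        (PySem.Set.ofList (pvGramsList (PySem.Chars.lower pn.toList))).contains
          (PySem.Chars.lower b.toList)) := rfl

-- A's three boundary patterns, as propositions
lemma pvCondA_iff_disj (pl bl : List Char) :
    pvCondA pl bl = true ↔
      ((bl ++ [' ']) <+: pl ∨ (' ' :: (bl ++ [' '])) <:+: pl ∨ (' ' :: bl) <:+ pl) := by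
  unfold pvCondA
  rw [Bool.or_eq_true, Bool.or_eq_true, PySem.Chars.startswith_iff, PySem.Chars.isIn_iff_infix,
    PySem.Chars.endswith_iff]
  tauto

lemma pvA_eq_filter (pn : String) (bm : List String) :
    analyze_brand_in_product_name pn bm =
      bm.filter (fun b => pvCondA (PySem.Chars.lower pn.toList) (PySem.Chars.lower b.toList)) := by
  unfold analyze_brand_in_product_name
  split
  · next h =>
    rw [h]
    symm
    rw [List.filter_eq_nil_iff]
    intro b _
    simp only [PySem.Chars.lower, List.map_nil, Bool.not_eq_true]
    rw [Bool.eq_false_iff]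
    intro hc
    rcases (pvCondA_iff_disj [] _).1 hc with h1 | h1 | h1
    · have := h1.length_le; simp at this
    · have := h1.length_le; simp at this
    · have := h1.length_le; simp at this
  · simpa using PySem.List.foldl_append_if
      (fun b : String => pvCondA (PySem.Chars.lower pn.toList) (PySem.Chars.lower b.toList))
      id bm []

-- membership in seps = a Nat index of a space in padded
lemma pvMem_seps (pl : List Char) (a : Int) :
    a ∈ pvSeps pl ↔ ∃ k : Nat, k < (pvPadded pl).length ∧ a = (k : Int) ∧
      (pvPadded pl)[k]? = some ' ' := by
  unfold pvSeps
  constructor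
  · intro ha
    obtain ⟨p, hp, rfl⟩ := List.mem_map.1 ha
    obtain ⟨hpe, hsp⟩ := List.mem_filter.1 hp
    obtain ⟨k, hk, rfl⟩ := (PySem.List.mem_enumerate_iff _ _ _).1 hpe
    refine ⟨k, hk, by simp, ?_⟩
    rw [List.getElem?_eq_getElem hk]
    simp only [beq_iff_eq] at hsp
    simp [hsp]
  · rintro ⟨k, hk, rfl, hsp⟩
    refine List.mem_map.2 ⟨((k : Int), (pvPadded pl)[k]), ?_, rfl⟩
    refine List.mem_filter.2 ⟨(PySem.List.mem_enumerate_iff _ _ _).2 ⟨k, hk, by simp⟩, ?_⟩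
    rw [List.getElem?_eq_getElem hk] at hsp
    simp only [beq_iff_eq]
    exact Option.some.inj hsp

-- membership in the gram list ↔ a pair of space positions (Nat indices) delimiting cs
lemma pvMem_gramsList (pl cs : List Char) :
    cs ∈ pvGramsList pl ↔
      ∃ i j : Nat, i < j ∧ j < (pvPadded pl).length ∧
        (pvPadded pl)[i]? = some ' ' ∧ (pvPadded pl)[j]? = some ' ' ∧
        cs = ((pvPadded pl).drop (i + 1)).take (j - (i + 1)) := by
  unfold pvGramsList
  rw [List.mem_flatMap]
  constructor
  · rintro ⟨a, ha, hcs⟩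
    obtain ⟨b, hb, rfl⟩ := List.mem_map.1 hcs
    obtain ⟨hb', hab⟩ := List.mem_filter.1 hb
    obtain ⟨i, hi, rfl, hsa⟩ := (pvMem_seps pl a).1 ha
    obtain ⟨j, hj, rfl, hsb⟩ := (pvMem_seps pl b).1 hb'
    simp only [decide_eq_true_eq] at hab
    have hij : i < j := by exact_mod_cast hab
    refine ⟨i, j, hij, hj, hsa, hsb, ?_⟩
    have : ((i : Int) + 1) = ((i + 1 : Nat) : Int) := by push_cast; ring
    rw [this, PySem.List.slice_natCast]
  · rintro ⟨i, j, hij, hj, hsa, hsb, rfl⟩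
    refine ⟨(i : Int), (pvMem_seps pl _).2 ⟨i, lt_trans hij hj, rfl, hsa⟩, ?_⟩
    refine List.mem_map.2 ⟨(j : Int), ?_, ?_⟩
    · refine List.mem_filter.2 ⟨(pvMem_seps pl _).2 ⟨j, hj, rfl, hsb⟩, by
        simp only [decide_eq_true_eq]; exact_mod_cast hij⟩
    · have : ((i : Int) + 1) = ((i + 1 : Nat) : Int) := by push_cast; ring
      rw [this, PySem.List.slice_natCast]

-- geometric core: a pair of delimiting spaces exists iff ' '++cs++' ' is an infix
lemma pvSeg_iff_infix (P cs : List Char) :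
    (∃ i j : Nat, i < j ∧ j < P.length ∧ P[i]? = some ' ' ∧ P[j]? = some ' ' ∧
        cs = (P.drop (i + 1)).take (j - (i + 1))) ↔
      (' ' :: (cs ++ [' '])) <:+: P := by
  constructor
  · rintro ⟨i, j, hij, hjlen, hPi, hPj, rfl⟩
    have hilen : i < P.length := lt_trans hij hjlen
    have hPi' : P[i] = ' ' := by
      rw [List.getElem?_eq_getElem hilen] at hPi; exact Option.some.inj hPi
    have hPj' : P[j] = ' ' := by
      rw [List.getElem?_eq_getElem hjlen] at hPj; exact Option.some.inj hPj
    refine ⟨P.take i, P.drop (j + 1), ?_⟩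
    have h3 : P.drop (i + 1) = (P.drop (i + 1)).take (j - (i + 1)) ++ P.drop j := by
      conv_lhs => rw [← List.take_append_drop (j - (i + 1)) (P.drop (i + 1))]
      rw [List.drop_drop]
      congr 2
      omega
    conv_rhs => rw [← List.take_append_drop i P,
      List.drop_eq_getElem_cons hilen, hPi', h3,
      List.drop_eq_getElem_cons hjlen, hPj']
    simp
  · rintro ⟨u, v, huv⟩
    have hlenP : P.length = u.length + cs.length + 2 + v.length := by
      rw [← huv]; simp; omega
    refine ⟨u.length, u.length + cs.length + 1, by omega, by omega, ?_, ?_, ?_⟩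
    · rw [← huv, List.append_assoc, List.getElem?_append_right (le_refl u.length)]
      simp
    · have hP2 : P = (u ++ [' '] ++ cs) ++ ([' '] ++ v) := by rw [← huv]; simp
      have hlen2 : (u ++ [' '] ++ cs).length = u.length + cs.length + 1 := by simp; omega
      rw [hP2, ← hlen2, List.getElem?_append_right (le_refl _)]
      simp
    · have hP2 : P = (u ++ [' ']) ++ (cs ++ ([' '] ++ v)) := by rw [← huv]; simp
      have hlen2 : (u ++ [' ']).length = u.length + 1 := by simp
      rw [hP2, ← hlen2, List.drop_left]
      have : u.length + cs.length + 1 - ((u ++ [' ']).length) = cs.length := by simp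
      rw [this]
      exact (List.take_left (l₂ := [' '] ++ v)).symm

-- decomposing an occurrence of ' '++bl++' ' in the padded product name
lemma pvInfix_padded_iff (pl bl : List Char) :
    (' ' :: (bl ++ [' '])) <:+: (' ' :: (pl ++ [' '])) ↔
      ((bl ++ [' ']) <+: pl ∨ (' ' :: (bl ++ [' '])) <:+: pl ∨ (' ' :: bl) <:+ pl) ∨ bl = pl := by
  constructor
  · rintro ⟨u, v, huv⟩
    cases u with
    | nil =>
      simp only [List.nil_append, List.cons_append, List.cons.injEq] at huv
      obtain ⟨-, huv⟩ := huv
      rcases List.eq_nil_or_concat v with rfl | ⟨w, x, rfl⟩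
      · right
        rw [List.append_nil] at huv
        exact (List.append_singleton_inj.1 huv).1
      · left; left
        have huv' : (bl ++ [' '] ++ w) ++ [x] = pl ++ [' '] := by
          rw [← huv]; simp
        obtain ⟨hpl, -⟩ := List.append_singleton_inj.1 huv'
        exact ⟨w, by rw [hpl]⟩
    | cons c u' =>
      simp only [List.cons_append, List.cons.injEq] at huv
      obtain ⟨-, huv⟩ := huv
      rcases List.eq_nil_or_concat v with rfl | ⟨w, x, rfl⟩
      · left; right; right
        rw [List.append_nil] at huv
        have huv' : (u' ++ (' ' :: bl)) ++ [' '] = pl ++ [' '] := by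
          rw [← huv]; simp
        obtain ⟨hpl, -⟩ := List.append_singleton_inj.1 huv'
        exact ⟨u', hpl⟩
      · left; right; left
        have huv' : (u' ++ (' ' :: (bl ++ [' '])) ++ w) ++ [x] = pl ++ [' '] := by
          rw [← huv]; simp
        obtain ⟨hpl, -⟩ := List.append_singleton_inj.1 huv'
        exact ⟨u', w, hpl.symm ▸ rfl⟩
  · rintro ((⟨t, ht⟩ | ⟨u, v, huv⟩ | ⟨u, hu⟩) | rfl)
    · exact ⟨[], t ++ [' '], by rw [← ht]; simp⟩
    · exact ⟨' ' :: u, v ++ [' '], by rw [← huv]; simp⟩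
    · exact ⟨' ' :: u, [], by rw [← hu]; simp⟩
    · exact ⟨[], [], by simp⟩

lemma pvContains_iff (pl bl : List Char) :
    (PySem.Set.ofList (pvGramsList pl)).contains bl = true ↔
      (' ' :: (bl ++ [' '])) <:+: (' ' :: (pl ++ [' '])) := by
  rw [PySem.Set.contains_iff, PySem.Set.mem_ofList, pvMem_gramsList, pvSeg_iff_infix]
  rfl

-- A's test never fires on bl = pl (each pattern is longer than pl)
lemma pvCondA_self (pl : List Char) : pvCondA pl pl = false := by
  rw [Bool.eq_false_iff]
  intro hc
  rcases (pvCondA_iff_disj pl pl).1 hc with h | h | h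
  · have := h.length_le; simp at this
  · have := h.length_le; simp at this
  · have := h.length_le; simp at this

lemma pvCondA_imp_contains (pl bl : List Char) (h : pvCondA pl bl = true) :
    (PySem.Set.ofList (pvGramsList pl)).contains bl = true := by
  rw [pvContains_iff, pvInfix_padded_iff]
  exact Or.inl ((pvCondA_iff_disj pl bl).1 h)

lemma pvContains_self (pl : List Char) :
    (PySem.Set.ofList (pvGramsList pl)).contains pl = true := by
  rw [pvContains_iff]

-- strict growth of filter length when q covers p on members and beats it at one member
lemma pvFilter_length_lt {α : Type} (p q : α → Bool) (l : List α)
    (hpq : ∀ a ∈ l, p a = true → q a = true) (x : α) (hx : x ∈ l)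
    (hq : q x = true) (hp : p x = false) :
    (l.filter p).length < (l.filter q).length := by
  rw [← List.countP_eq_length_filter, ← List.countP_eq_length_filter]
  induction l with
  | nil => cases hx
  | cons a as ih =>
    have hsub : ∀ a' ∈ as, p a' = true → q a' = true :=
      fun a' h' => hpq a' (List.mem_cons_of_mem _ h')
    rw [List.countP_cons, List.countP_cons]
    rcases List.mem_cons.1 hx with rfl | hx'
    · have hle : as.countP p ≤ as.countP q := List.countP_mono_left hsub
      simp [hp, hq]
      omega
    · have hlt := ih hsub hx'
      by_cases ha : p a = true
      · have := hpq a List.mem_cons_self ha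
        simp [ha, this]
        omega
      · rw [Bool.not_eq_true] at ha
        simp only [ha]
        cases hqa : q a <;> simp <;> omega

lemma pvLower_ne (pn b : String) (h : PySem.Str.lower b ≠ PySem.Str.lower pn) :
    PySem.Chars.lower b.toList ≠ PySem.Chars.lower pn.toList := by
  intro hc
  apply h
  have : (PySem.Str.lower b).toList = (PySem.Str.lower pn).toList := by
    rw [PySem.Str.toList_lower, PySem.Str.toList_lower]; exact hc
  exact String.toList_inj.1 this

lemma pvLower_eq (pn b : String) (h : PySem.Str.lower b = PySem.Str.lower pn) :
    PySem.Chars.lower b.toList = PySem.Chars.lower pn.toList := by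
  rw [← PySem.Str.toList_lower, ← PySem.Str.toList_lower, h]

-- ===== VERDICT (by name: the statement is the Claim_ definition above) =====
theorem analyze_brand_in_product_name_spec : Claim_unchanged_analyze_brand_in_product_name := by
  intro pn bm _ hnd
  rw [pvA_eq_filter, pvAlt_eq_filter]
  apply List.filter_congr
  intro b hb
  have hne : PySem.Chars.lower b.toList ≠ PySem.Chars.lower pn.toList :=
    pvLower_ne pn b (fun he => hnd ⟨b, hb, he⟩)
  by_cases hc : pvCondA (PySem.Chars.lower pn.toList) (PySem.Chars.lower b.toList) = true
  · rw [hc, Eq.comm]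
    exact pvCondA_imp_contains _ _ hc
  · rw [Bool.not_eq_true] at hc
    rw [hc, Eq.comm, Bool.eq_false_iff]
    intro hcon
    rcases (pvInfix_padded_iff _ _).1 ((pvContains_iff _ _).1 hcon) with hd | he
    · rw [(pvCondA_iff_disj _ _).2 hd] at hc
      cases hc
    · exact hne he

theorem analyze_brand_in_product_name_changed : Claim_changed_analyze_brand_in_product_name := by
  unfold Claim_changed_analyze_brand_in_product_name; decide

theorem analyze_brand_in_product_name_tight : Claim_exact_analyze_brand_in_product_name := by
  intro pn bm _ hd
  obtain ⟨b0, hb0, heq⟩ := hd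
  have hbl0 : PySem.Chars.lower b0.toList = PySem.Chars.lower pn.toList := pvLower_eq pn b0 heq
  rw [pvA_eq_filter, pvAlt_eq_filter]
  intro hcontra
  have hlt := pvFilter_length_lt
    (fun b => pvCondA (PySem.Chars.lower pn.toList) (PySem.Chars.lower b.toList))
    (fun b => (PySem.Set.ofList (pvGramsList (PySem.Chars.lower pn.toList))).contains
      (PySem.Chars.lower b.toList))
    bm (fun a _ ha => pvCondA_imp_contains _ _ ha) b0 hb0
    (by simp only [hbl0]; exact pvContains_self _)
    (by simp only [hbl0]; exact pvCondA_self _)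
  rw [hcontra] at hlt
  exact lt_irrefl _ hlt
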